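-- pv_equiv track=rewrite | github.com/kcarollee/Problem-Solving | Python/1550.py | convert
-- ===== SOURCE A (Python) =====
-- def convert(arr):
-- 	l = len(arr)
-- 	num = 0
-- 	for i in range(0, l):
-- 		if 48 <= ord(arr[i]) <= 57:
-- 			num += int(arr[i]) * (16 ** (l - i - 1))
-- 		elif 65 <= ord(arr[i]) <= 70:
-- 			num += (ord(arr[i]) - 55) * (16 ** (l - i - 1))
-- 	return num
-- ===== SOURCE B (Python) =====
-- def convert(arr):
--     num = 0
--     for ch in arr:
--         o = ord(ch)
--         if 48 <= o <= 57:
--             d = o - 48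
--         elif 65 <= o <= 70:
--             d = o - 55
--         else:
--             d = 0
--         num = num * 16 + d
--     return num
-- ===== Notes on version B (the rewrite author's own statement) =====
-- stated objective: simpler
-- what changed: Replaces the per-character computation of the positional power 16**(l-i-1) and indexed loop with a single Horner pass num = num*16 + digit over the characters.
import Mathlib
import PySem

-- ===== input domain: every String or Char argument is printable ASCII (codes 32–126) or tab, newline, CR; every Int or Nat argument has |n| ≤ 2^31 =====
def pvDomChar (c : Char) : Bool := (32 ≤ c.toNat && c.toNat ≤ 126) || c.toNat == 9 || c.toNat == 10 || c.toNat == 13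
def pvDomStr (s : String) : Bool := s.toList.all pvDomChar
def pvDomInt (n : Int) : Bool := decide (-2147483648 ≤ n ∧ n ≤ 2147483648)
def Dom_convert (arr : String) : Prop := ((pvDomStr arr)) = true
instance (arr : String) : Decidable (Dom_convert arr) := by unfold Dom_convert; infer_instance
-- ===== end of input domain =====

-- B replaces A's per-index computation of 16**(l-i-1) with a single Horner pass (num = num*16 + digit): simpler, one uniform step per character.


-- ===== PORT A =====
-- literal port of A: loop i in range(0, l), add digit * 16 ** (l - i - 1)
def convert (arr : String) : Int :=
  let cs := arr.toList
  let l : Int := PySem.Str.len arr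
  (PySem.List.pyRange 0 l 1).foldl (fun num i =>
    let c : Char := PySem.List.pyGetD cs i ' '   -- arr[i]; i ∈ range(0, l) so always in range
    if 48 ≤ (c.toNat : Int) ∧ (c.toNat : Int) ≤ 57 then
      num + ((c.toNat : Int) - 48) * 16 ^ (l - i - 1).toNat
    else if 65 ≤ (c.toNat : Int) ∧ (c.toNat : Int) ≤ 70 then
      num + ((c.toNat : Int) - 55) * 16 ^ (l - i - 1).toNat
    else num) 0

-- ===== PORT B =====
-- digit value of one character, as in Source B's if/elif/else
def hexDigit (c : Char) : Int :=
  if 48 ≤ (c.toNat : Int) ∧ (c.toNat : Int) ≤ 57 then (c.toNat : Int) - 48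
  else if 65 ≤ (c.toNat : Int) ∧ (c.toNat : Int) ≤ 70 then (c.toNat : Int) - 55
  else 0

def convert_alt (arr : String) : Int :=
  arr.toList.foldl (fun num c => num * 16 + hexDigit c) 0

-- ===== PRECONDITION & SPEC =====
def Spec_convert (arr : String) (out : Int) : Prop := out = convert_alt arr
instance (arr : String) (out : Int) : Decidable (Spec_convert arr out) := by unfold Spec_convert; infer_instance

-- ===== CLAIM (what is proved, stated in full; the proofs are below) =====
def Claim_equal_convert : Prop := ∀ (arr : String), Dom_convert arr → Spec_convert arr (convert arr)

-- ===== LEMMAS AND PROOFS =====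

-- big-endian value of a character list
def gval : List Char → Int
  | [] => 0
  | c :: rest => hexDigit c * 16 ^ rest.length + gval rest

-- A's loop from index a computes num + gval (cs.drop a)
theorem convertA_loop (cs : List Char) (a : Nat) (ha : a ≤ cs.length) (num : Int) :
    (PySem.List.pyRange (a : Int) (cs.length : Int) 1).foldl (fun num i =>
      if 48 ≤ ((PySem.List.pyGetD cs i ' ').toNat : Int) ∧ ((PySem.List.pyGetD cs i ' ').toNat : Int) ≤ 57 then
        num + (((PySem.List.pyGetD cs i ' ').toNat : Int) - 48) * 16 ^ ((cs.length : Int) - i - 1).toNat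
      else if 65 ≤ ((PySem.List.pyGetD cs i ' ').toNat : Int) ∧ ((PySem.List.pyGetD cs i ' ').toNat : Int) ≤ 70 then
        num + (((PySem.List.pyGetD cs i ' ').toNat : Int) - 55) * 16 ^ ((cs.length : Int) - i - 1).toNat
      else num) num = num + gval (cs.drop a) := by
  induction h : cs.length - a generalizing a num with
  | zero =>
    have hae : a = cs.length := by omega
    subst hae
    rw [PySem.List.pyRange_one_eq_nil (by omega)]
    simp [gval]
  | succ n ih =>
    have halt : a < cs.length := by omega
    rw [PySem.List.pyRange_one_cons (by exact_mod_cast halt)]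
    simp only [List.foldl_cons]
    have hget : PySem.List.pyGetD cs (a : Int) ' ' = cs[a] := by
      rw [PySem.List.pyGetD_natCast]
      simp [List.getD, halt]
    have hdrop : cs.drop a = cs[a] :: cs.drop (a + 1) :=
      List.drop_eq_getElem_cons halt
    have hexp : ((cs.length : Int) - (a : Int) - 1).toNat = (cs.drop (a + 1)).length := by
      simp [List.length_drop]; omega
    have hstep : ∀ num : Int,
        (if 48 ≤ ((PySem.List.pyGetD cs (a : Int) ' ').toNat : Int) ∧ ((PySem.List.pyGetD cs (a : Int) ' ').toNat : Int) ≤ 57 then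
          num + (((PySem.List.pyGetD cs (a : Int) ' ').toNat : Int) - 48) * 16 ^ ((cs.length : Int) - (a : Int) - 1).toNat
        else if 65 ≤ ((PySem.List.pyGetD cs (a : Int) ' ').toNat : Int) ∧ ((PySem.List.pyGetD cs (a : Int) ' ').toNat : Int) ≤ 70 then
          num + (((PySem.List.pyGetD cs (a : Int) ' ').toNat : Int) - 55) * 16 ^ ((cs.length : Int) - (a : Int) - 1).toNat
        else num) = num + hexDigit cs[a] * 16 ^ (cs.drop (a + 1)).length := by
      intro num
      simp only [hget, hexp, hexDigit]
      split_ifs <;> ring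
    have ha1 : (a : Int) + 1 = ((a + 1 : Nat) : Int) := by push_cast; ring
    rw [hstep, ha1, ih (a + 1) (by omega) _ (by omega), hdrop]
    simp [gval]
    ring

-- A's loop over the whole string
theorem convertA_loop0 (cs : List Char) (num : Int) :
    (PySem.List.pyRange 0 (cs.length : Int) 1).foldl (fun num i =>
      if 48 ≤ ((PySem.List.pyGetD cs i ' ').toNat : Int) ∧ ((PySem.List.pyGetD cs i ' ').toNat : Int) ≤ 57 then
        num + (((PySem.List.pyGetD cs i ' ').toNat : Int) - 48) * 16 ^ ((cs.length : Int) - i - 1).toNat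
      else if 65 ≤ ((PySem.List.pyGetD cs i ' ').toNat : Int) ∧ ((PySem.List.pyGetD cs i ' ').toNat : Int) ≤ 70 then
        num + (((PySem.List.pyGetD cs i ' ').toNat : Int) - 55) * 16 ^ ((cs.length : Int) - i - 1).toNat
      else num) num = num + gval cs := by
  have h := convertA_loop cs 0 (by omega) num
  simpa using h

-- B's Horner loop: foldl from num equals num * 16 ^ len + gval
theorem convertB_loop (cs : List Char) (num : Int) :
    cs.foldl (fun num c => num * 16 + hexDigit c) num
      = num * 16 ^ cs.length + gval cs := by
  induction cs generalizing num with
  | nil => simp [gval]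
  | cons c rest ih =>
    simp only [List.foldl_cons, ih, gval, List.length_cons]
    ring

-- ===== VERDICT (by name: the statement is the Claim_ definition above) =====
theorem convert_spec : Claim_equal_convert := by
  intro arr _
  unfold Spec_convert convert convert_alt
  simp only [PySem.Str.len_eq]
  rw [convertA_loop0 arr.toList 0, convertB_loop]
  simp
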